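-- pv_equiv track=rewrite | github.com/Final-Year-B-Tech-Project/MoneyMentor | agents/api_service.py | _categorize_fund
-- ===== SOURCE A (Python) =====
-- def _categorize_fund(fund_name):
--     """Categorize fund based on name"""
--     name_lower = fund_name.lower()
--
--     if any(word in name_lower for word in ['debt', 'bond', 'income', 'gilt']):
--         return 'Debt Fund'
--     elif any(word in name_lower for word in ['liquid', 'ultra short', 'overnight']):
--         return 'Liquid Fund'
--     elif any(word in name_lower for word in ['large cap', 'bluechip']):
--         return 'Large Cap Equity'
--     elif any(word in name_lower for word in ['mid cap']):
--         return 'Mid Cap Equity'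
--     elif any(word in name_lower for word in ['small cap']):
--         return 'Small Cap Equity'
--     elif any(word in name_lower for word in ['multi cap', 'flexi cap']):
--         return 'Multi Cap Equity'
--     elif any(word in name_lower for word in ['hybrid', 'balanced']):
--         return 'Hybrid Fund'
--     elif any(word in name_lower for word in ['index']):
--         return 'Index Fund'
--     else:
--         return 'Equity Fund'
-- ===== SOURCE B (Python) =====
-- # B: instead of testing the 8 category keyword groups one after another with
-- # substring searches, scan the lowercased name once, position by position;
-- # at each position record the priority of any keyword starting there, and
-- # keep the minimum priority seen.  Priority order = A's branch order.
-- _KEYWORDS = [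
--     ('debt', 0), ('bond', 0), ('income', 0), ('gilt', 0),
--     ('liquid', 1), ('ultra short', 1), ('overnight', 1),
--     ('large cap', 2), ('bluechip', 2),
--     ('mid cap', 3),
--     ('small cap', 4),
--     ('multi cap', 5), ('flexi cap', 5),
--     ('hybrid', 6), ('balanced', 6),
--     ('index', 7),
-- ]
-- _CATEGORIES = ['Debt Fund', 'Liquid Fund', 'Large Cap Equity', 'Mid Cap Equity',
--                'Small Cap Equity', 'Multi Cap Equity', 'Hybrid Fund', 'Index Fund',
--                'Equity Fund']
--
-- def _categorize_fund(fund_name):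
--     s = fund_name.lower()
--     best = 8
--     for i in range(len(s)):
--         for kw, pr in _KEYWORDS:
--             if pr < best and s.startswith(kw, i):
--                 best = pr
--     return _CATEGORIES[best]
-- ===== Notes on version B (the rewrite author's own statement) =====
-- stated objective: alternative
-- what changed: Replaced the chain of per-group substring searches by a single left-to-right scan of the lowercased name that, at each position, takes the minimum priority of any keyword starting there and indexes a category array with the minimum found.
import Mathlib
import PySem

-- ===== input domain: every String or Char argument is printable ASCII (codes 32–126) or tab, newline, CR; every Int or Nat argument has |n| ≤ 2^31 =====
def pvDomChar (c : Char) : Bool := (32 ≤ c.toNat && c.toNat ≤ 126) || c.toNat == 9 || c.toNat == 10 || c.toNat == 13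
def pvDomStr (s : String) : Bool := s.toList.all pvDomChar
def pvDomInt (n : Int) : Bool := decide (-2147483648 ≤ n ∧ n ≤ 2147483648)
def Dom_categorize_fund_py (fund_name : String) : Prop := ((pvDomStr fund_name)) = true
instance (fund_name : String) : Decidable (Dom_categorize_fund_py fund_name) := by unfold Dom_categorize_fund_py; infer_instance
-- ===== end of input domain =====

-- B replaces A's chain of per-group substring tests by a single positional scan of the
-- lowercased name that keeps the minimum priority of any keyword starting at each position
-- (objective: alternative).

-- ===== PORT A =====
def categorize_fund_py (fund_name : String) : String :=
  let name_lower := PySem.Str.lower fund_name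
  if ["debt", "bond", "income", "gilt"].any (fun word => PySem.Str.isIn word name_lower) then
    "Debt Fund"
  else if ["liquid", "ultra short", "overnight"].any (fun word => PySem.Str.isIn word name_lower) then
    "Liquid Fund"
  else if ["large cap", "bluechip"].any (fun word => PySem.Str.isIn word name_lower) then
    "Large Cap Equity"
  else if ["mid cap"].any (fun word => PySem.Str.isIn word name_lower) then
    "Mid Cap Equity"
  else if ["small cap"].any (fun word => PySem.Str.isIn word name_lower) then
    "Small Cap Equity"
  else if ["multi cap", "flexi cap"].any (fun word => PySem.Str.isIn word name_lower) then
    "Multi Cap Equity"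
  else if ["hybrid", "balanced"].any (fun word => PySem.Str.isIn word name_lower) then
    "Hybrid Fund"
  else if ["index"].any (fun word => PySem.Str.isIn word name_lower) then
    "Index Fund"
  else
    "Equity Fund"

-- ===== PORT B =====
def pvKeywords : List (List Char × Nat) :=
  [("debt".toList, 0), ("bond".toList, 0), ("income".toList, 0), ("gilt".toList, 0),
   ("liquid".toList, 1), ("ultra short".toList, 1), ("overnight".toList, 1),
   ("large cap".toList, 2), ("bluechip".toList, 2),
   ("mid cap".toList, 3),
   ("small cap".toList, 4),
   ("multi cap".toList, 5), ("flexi cap".toList, 5),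
   ("hybrid".toList, 6), ("balanced".toList, 6),
   ("index".toList, 7)]

def pvCategories : List String :=
  ["Debt Fund", "Liquid Fund", "Large Cap Equity", "Mid Cap Equity",
   "Small Cap Equity", "Multi Cap Equity", "Hybrid Fund", "Index Fund",
   "Equity Fund"]

-- the inner 'for kw, pr in _KEYWORDS' loop of Source B;
-- s.startswith(kw, i) with 0 ≤ i is exactly 'kw is a prefix of s with i dropped'
def pvInner (s : List Char) (i : Nat) (b : Nat) : Nat :=
  pvKeywords.foldl (fun b kp => if kp.2 < b && kp.1.isPrefixOf (s.drop i) then kp.2 else b) b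

-- the outer 'for i in range(len(s))' loop of Source B
def pvBest (s : List Char) : Nat :=
  (List.range s.length).foldl (fun b i => pvInner s i b) 8

def categorize_fund_py_alt (fund_name : String) : String :=
  let s := PySem.Chars.lower fund_name.toList
  -- _CATEGORIES[best]: best ≤ 8 always (proved below), so an in-range list indexing
  PySem.List.pyGetD pvCategories (pvBest s : Int) "Equity Fund"

-- ===== PRECONDITION & SPEC =====
def Spec_categorize_fund_py (fund_name : String) (out : String) : Prop := out = categorize_fund_py_alt fund_name
instance (fund_name : String) (out : String) : Decidable (Spec_categorize_fund_py fund_name out) := by unfold Spec_categorize_fund_py; infer_instance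

-- ===== CLAIM (what is proved, stated in full; the proofs are below) =====
def Claim_equal_categorize_fund_py : Prop := ∀ (fund_name : String), Dom_categorize_fund_py fund_name → Spec_categorize_fund_py fund_name (categorize_fund_py fund_name)

-- ===== LEMMAS AND PROOFS =====

-- generic facts about one pass of the guarded-min loop shape
theorem pvFoldmin_le (l : List (List Char × Nat)) (q : List Char → Bool) (b : Nat) :
    l.foldl (fun b kp => if kp.2 < b && q kp.1 then kp.2 else b) b ≤ b := by
  induction l generalizing b with
  | nil => simp
  | cons kp rest ih =>
    simp only [List.foldl_cons]
    refine le_trans (ih _) ?_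
    split_ifs with h
    · simp only [Bool.and_eq_true, decide_eq_true_eq] at h
      exact le_of_lt h.1
    · exact le_rfl

theorem pvFoldmin_cases (l : List (List Char × Nat)) (q : List Char → Bool) (b : Nat) :
    l.foldl (fun b kp => if kp.2 < b && q kp.1 then kp.2 else b) b = b ∨
      ∃ kp ∈ l, q kp.1 = true ∧
        l.foldl (fun b kp => if kp.2 < b && q kp.1 then kp.2 else b) b = kp.2 := by
  induction l generalizing b with
  | nil => left; simp
  | cons kp rest ih =>
    simp only [List.foldl_cons]
    by_cases h : kp.2 < b ∧ q kp.1 = true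
    · rcases ih (b := kp.2) with h1 | ⟨kp', hmem, hq, heq⟩
      · right
        refine ⟨kp, by simp, h.2, ?_⟩
        rw [if_pos (by simp [h.1, h.2])]; exact h1
      · right
        refine ⟨kp', by simp [hmem], hq, ?_⟩
        rw [if_pos (by simp [h.1, h.2])]; exact heq
    · rw [if_neg (by simp only [Bool.and_eq_true, decide_eq_true_eq]; tauto)]
      rcases ih (b := b) with h1 | ⟨kp', hmem, hq, heq⟩
      · left; exact h1
      · right; exact ⟨kp', by simp [hmem], hq, heq⟩

theorem pvFoldmin_min (l : List (List Char × Nat)) (q : List Char → Bool)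
    (kp : List Char × Nat) (hq : q kp.1 = true) :
    ∀ b, kp ∈ l →
      l.foldl (fun b kp => if kp.2 < b && q kp.1 then kp.2 else b) b ≤ kp.2 := by
  induction l with
  | nil => intro b hmem; cases hmem
  | cons kp' rest ih =>
    intro b hmem
    simp only [List.foldl_cons]
    rcases List.mem_cons.mp hmem with rfl | hmem'
    · refine le_trans (pvFoldmin_le _ _ _) ?_
      split_ifs with h
      · exact le_rfl
      · have : ¬ kp.2 < b := by
          intro hlt; exact h (by simp [hlt, hq])
        omega
    · exact ih _ hmem'

-- the same three facts, stated for the inner loop by name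
theorem pvInner_le (s : List Char) (i : Nat) (b : Nat) : pvInner s i b ≤ b := by
  unfold pvInner; exact pvFoldmin_le pvKeywords (fun kw => kw.isPrefixOf (s.drop i)) b

theorem pvInner_cases (s : List Char) (i : Nat) (b : Nat) :
    pvInner s i b = b ∨
      ∃ kp ∈ pvKeywords, kp.1.isPrefixOf (s.drop i) = true ∧ pvInner s i b = kp.2 := by
  unfold pvInner; exact pvFoldmin_cases pvKeywords (fun kw => kw.isPrefixOf (s.drop i)) b

theorem pvInner_min (s : List Char) (i : Nat) (b : Nat)
    (kp : List Char × Nat) (hkp : kp ∈ pvKeywords) (hpre : kp.1.isPrefixOf (s.drop i) = true) :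
    pvInner s i b ≤ kp.2 := by
  unfold pvInner; exact pvFoldmin_min pvKeywords (fun kw => kw.isPrefixOf (s.drop i)) kp hpre b hkp

-- and for the outer positional loop
theorem pvBestFold_le (L : List Nat) (s : List Char) (b : Nat) :
    L.foldl (fun b i => pvInner s i b) b ≤ b := by
  induction L generalizing b with
  | nil => simp
  | cons i rest ih =>
    simp only [List.foldl_cons]
    exact le_trans (ih _) (pvInner_le _ _ _)

theorem pvBestFold_cases (L : List Nat) (s : List Char) (b : Nat) :
    L.foldl (fun b i => pvInner s i b) b = b ∨
      ∃ i ∈ L, ∃ kp ∈ pvKeywords, kp.1.isPrefixOf (s.drop i) = true ∧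
        L.foldl (fun b i => pvInner s i b) b = kp.2 := by
  induction L generalizing b with
  | nil => left; simp
  | cons i rest ih =>
    simp only [List.foldl_cons]
    rcases ih (b := pvInner s i b) with h1 | ⟨i', hi', kp, hkp, hpre, heq⟩
    · rcases pvInner_cases s i b with h2 | ⟨kp, hkp, hq, heq⟩
      · left; rw [h1]; exact h2
      · right; exact ⟨i, by simp, kp, hkp, hq, by rw [h1]; exact heq⟩
    · right; exact ⟨i', by simp [hi'], kp, hkp, hpre, heq⟩

theorem pvBestFold_min (L : List Nat) (s : List Char)
    (i : Nat) (kp : List Char × Nat) (hkp : kp ∈ pvKeywords)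
    (hpre : kp.1.isPrefixOf (s.drop i) = true) :
    ∀ b, i ∈ L → L.foldl (fun b i => pvInner s i b) b ≤ kp.2 := by
  induction L with
  | nil => intro b hi; cases hi
  | cons i' rest ih =>
    intro b hi
    simp only [List.foldl_cons]
    rcases List.mem_cons.mp hi with rfl | hi'
    · exact le_trans (pvBestFold_le _ _ _) (pvInner_min _ _ _ kp hkp hpre)
    · exact ih _ hi'

-- occurrence of a keyword of priority j somewhere in s
def pvOcc (s : List Char) (j : Nat) : Prop :=
  ∃ kp ∈ pvKeywords, kp.2 = j ∧ PySem.Chars.isIn kp.1 s = true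

theorem pvKeywords_ne_nil : ∀ kp ∈ pvKeywords, kp.1 ≠ [] := by decide

-- positional match ↔ substring containment, for the nonempty keywords of the table
theorem pvMatch_iff (s : List Char) (kp : List Char × Nat) (hkp : kp ∈ pvKeywords) :
    (∃ i, i ∈ List.range s.length ∧ kp.1.isPrefixOf (s.drop i) = true) ↔
      PySem.Chars.isIn kp.1 s = true := by
  constructor
  · rintro ⟨i, _, hpre⟩
    exact (PySem.Chars.exists_prefix_drop_iff_isIn _ _).mp ⟨i, List.isPrefixOf_iff_prefix.mp hpre⟩
  · intro h
    obtain ⟨j, hj⟩ := (PySem.Chars.exists_prefix_drop_iff_isIn _ _).mpr h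
    by_cases hjn : j < s.length
    · exact ⟨j, List.mem_range.mpr hjn, List.isPrefixOf_iff_prefix.mpr hj⟩
    · exfalso
      have hnil : s.drop j = [] := List.drop_eq_nil_of_le (by omega)
      rw [hnil] at hj
      exact pvKeywords_ne_nil kp hkp (List.prefix_nil.mp hj)

theorem pvBest_cases (s : List Char) : pvBest s = 8 ∨ pvOcc s (pvBest s) := by
  rcases pvBestFold_cases (List.range s.length) s 8 with h | ⟨i, hi, kp, hkp, hpre, heq⟩
  · left; exact h
  · right
    exact ⟨kp, hkp, heq.symm, (pvMatch_iff s kp hkp).mp ⟨i, hi, hpre⟩⟩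

theorem pvBest_min (s : List Char) (j : Nat) (h : pvOcc s j) : pvBest s ≤ j := by
  obtain ⟨kp, hkp, hpr, hin⟩ := h
  obtain ⟨i, hi, hpre⟩ := (pvMatch_iff s kp hkp).mpr hin
  exact hpr ▸ pvBestFold_min (List.range s.length) s i kp hkp hpre 8 hi

theorem pvBest_eq (s : List Char) (j : Nat) (hj : j < 8) (hocc : pvOcc s j)
    (hnot : ∀ k < j, ¬ pvOcc s k) : pvBest s = j := by
  have hle := pvBest_min s j hocc
  rcases pvBest_cases s with h8 | hocc'
  · omega
  · have hnlt : ¬ pvBest s < j := fun hlt => hnot _ hlt hocc'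
    omega

theorem pvBest_eq_default (s : List Char) (hnot : ∀ k < 8, ¬ pvOcc s k) : pvBest s = 8 := by
  rcases pvBest_cases s with h | hocc
  · exact h
  · exfalso
    obtain ⟨kp, hm, hpr, hin⟩ := hocc
    have h8 : kp.2 < 8 := (by decide : ∀ kp ∈ pvKeywords, kp.2 < 8) kp hm
    exact hnot _ (hpr ▸ h8) ⟨kp, hm, hpr, hin⟩

-- A's eight group conditions, each equivalent to an occurrence of that priority
theorem pvOcc0_iff (s : List Char) :
    pvOcc s 0 ↔ (["debt", "bond", "income", "gilt"].any (fun w => PySem.Chars.isIn w.toList s)) = true := by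
  unfold pvOcc pvKeywords
  simp only [List.mem_cons, List.not_mem_nil, or_false, List.any_cons, List.any_nil,
    Bool.or_eq_true, Bool.false_eq_true]
  constructor
  · rintro ⟨kp, hmem, hpr, hin⟩
    rcases hmem with rfl | rfl | rfl | rfl | rfl | rfl | rfl | rfl | rfl | rfl | rfl | rfl | rfl | rfl | rfl | rfl <;> simp_all
  · rintro (h | h | h | h)
    · exact ⟨("debt".toList, 0), by simp, rfl, h⟩
    · exact ⟨("bond".toList, 0), by simp, rfl, h⟩
    · exact ⟨("income".toList, 0), by simp, rfl, h⟩
    · exact ⟨("gilt".toList, 0), by simp, rfl, h⟩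

theorem pvOcc1_iff (s : List Char) :
    pvOcc s 1 ↔ (["liquid", "ultra short", "overnight"].any (fun w => PySem.Chars.isIn w.toList s)) = true := by
  unfold pvOcc pvKeywords
  simp only [List.mem_cons, List.not_mem_nil, or_false, List.any_cons, List.any_nil,
    Bool.or_eq_true, Bool.false_eq_true]
  constructor
  · rintro ⟨kp, hmem, hpr, hin⟩
    rcases hmem with rfl | rfl | rfl | rfl | rfl | rfl | rfl | rfl | rfl | rfl | rfl | rfl | rfl | rfl | rfl | rfl <;> simp_all
  · rintro (h | h | h)
    · exact ⟨("liquid".toList, 1), by simp, rfl, h⟩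
    · exact ⟨("ultra short".toList, 1), by simp, rfl, h⟩
    · exact ⟨("overnight".toList, 1), by simp, rfl, h⟩

theorem pvOcc2_iff (s : List Char) :
    pvOcc s 2 ↔ (["large cap", "bluechip"].any (fun w => PySem.Chars.isIn w.toList s)) = true := by
  unfold pvOcc pvKeywords
  simp only [List.mem_cons, List.not_mem_nil, or_false, List.any_cons, List.any_nil,
    Bool.or_eq_true, Bool.false_eq_true]
  constructor
  · rintro ⟨kp, hmem, hpr, hin⟩
    rcases hmem with rfl | rfl | rfl | rfl | rfl | rfl | rfl | rfl | rfl | rfl | rfl | rfl | rfl | rfl | rfl | rfl <;> simp_all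
  · rintro (h | h)
    · exact ⟨("large cap".toList, 2), by simp, rfl, h⟩
    · exact ⟨("bluechip".toList, 2), by simp, rfl, h⟩

theorem pvOcc3_iff (s : List Char) :
    pvOcc s 3 ↔ (["mid cap"].any (fun w => PySem.Chars.isIn w.toList s)) = true := by
  unfold pvOcc pvKeywords
  simp only [List.mem_cons, List.not_mem_nil, or_false, List.any_cons, List.any_nil,
    Bool.or_eq_true, Bool.false_eq_true]
  constructor
  · rintro ⟨kp, hmem, hpr, hin⟩
    rcases hmem with rfl | rfl | rfl | rfl | rfl | rfl | rfl | rfl | rfl | rfl | rfl | rfl | rfl | rfl | rfl | rfl <;> simp_all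
  · rintro h
    exact ⟨("mid cap".toList, 3), by simp, rfl, by simpa using h⟩

theorem pvOcc4_iff (s : List Char) :
    pvOcc s 4 ↔ (["small cap"].any (fun w => PySem.Chars.isIn w.toList s)) = true := by
  unfold pvOcc pvKeywords
  simp only [List.mem_cons, List.not_mem_nil, or_false, List.any_cons, List.any_nil,
    Bool.or_eq_true, Bool.false_eq_true]
  constructor
  · rintro ⟨kp, hmem, hpr, hin⟩
    rcases hmem with rfl | rfl | rfl | rfl | rfl | rfl | rfl | rfl | rfl | rfl | rfl | rfl | rfl | rfl | rfl | rfl <;> simp_all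
  · rintro h
    exact ⟨("small cap".toList, 4), by simp, rfl, by simpa using h⟩

theorem pvOcc5_iff (s : List Char) :
    pvOcc s 5 ↔ (["multi cap", "flexi cap"].any (fun w => PySem.Chars.isIn w.toList s)) = true := by
  unfold pvOcc pvKeywords
  simp only [List.mem_cons, List.not_mem_nil, or_false, List.any_cons, List.any_nil,
    Bool.or_eq_true, Bool.false_eq_true]
  constructor
  · rintro ⟨kp, hmem, hpr, hin⟩
    rcases hmem with rfl | rfl | rfl | rfl | rfl | rfl | rfl | rfl | rfl | rfl | rfl | rfl | rfl | rfl | rfl | rfl <;> simp_all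
  · rintro (h | h)
    · exact ⟨("multi cap".toList, 5), by simp, rfl, h⟩
    · exact ⟨("flexi cap".toList, 5), by simp, rfl, h⟩

theorem pvOcc6_iff (s : List Char) :
    pvOcc s 6 ↔ (["hybrid", "balanced"].any (fun w => PySem.Chars.isIn w.toList s)) = true := by
  unfold pvOcc pvKeywords
  simp only [List.mem_cons, List.not_mem_nil, or_false, List.any_cons, List.any_nil,
    Bool.or_eq_true, Bool.false_eq_true]
  constructor
  · rintro ⟨kp, hmem, hpr, hin⟩
    rcases hmem with rfl | rfl | rfl | rfl | rfl | rfl | rfl | rfl | rfl | rfl | rfl | rfl | rfl | rfl | rfl | rfl <;> simp_all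
  · rintro (h | h)
    · exact ⟨("hybrid".toList, 6), by simp, rfl, h⟩
    · exact ⟨("balanced".toList, 6), by simp, rfl, h⟩

theorem pvOcc7_iff (s : List Char) :
    pvOcc s 7 ↔ (["index"].any (fun w => PySem.Chars.isIn w.toList s)) = true := by
  unfold pvOcc pvKeywords
  simp only [List.mem_cons, List.not_mem_nil, or_false, List.any_cons, List.any_nil,
    Bool.or_eq_true, Bool.false_eq_true]
  constructor
  · rintro ⟨kp, hmem, hpr, hin⟩
    rcases hmem with rfl | rfl | rfl | rfl | rfl | rfl | rfl | rfl | rfl | rfl | rfl | rfl | rfl | rfl | rfl | rfl <;> simp_all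
  · rintro h
    exact ⟨("index".toList, 7), by simp, rfl, by simpa using h⟩

-- ===== VERDICT (by name: the statement is the Claim_ definition above) =====
theorem categorize_fund_py_spec : Claim_equal_categorize_fund_py := by
  intro fund_name _
  unfold Spec_categorize_fund_py categorize_fund_py categorize_fund_py_alt
  simp only [PySem.Str.isIn_eq, PySem.Str.toList_lower]
  set s := PySem.Chars.lower fund_name.toList with hs
  by_cases h0 : (["debt", "bond", "income", "gilt"].any (fun w => PySem.Chars.isIn w.toList s)) = true
  · rw [if_pos h0, pvBest_eq s 0 (by omega) ((pvOcc0_iff s).mpr h0) (by omega)]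
    decide
  rw [if_neg h0]
  by_cases h1 : (["liquid", "ultra short", "overnight"].any (fun w => PySem.Chars.isIn w.toList s)) = true
  · rw [if_pos h1, pvBest_eq s 1 (by omega) ((pvOcc1_iff s).mpr h1)
      (by intro k hk; interval_cases k
          · exact fun hc => h0 ((pvOcc0_iff s).mp hc))]
    decide
  rw [if_neg h1]
  by_cases h2 : (["large cap", "bluechip"].any (fun w => PySem.Chars.isIn w.toList s)) = true
  · rw [if_pos h2, pvBest_eq s 2 (by omega) ((pvOcc2_iff s).mpr h2)
      (by intro k hk; interval_cases k
          · exact fun hc => h0 ((pvOcc0_iff s).mp hc)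
          · exact fun hc => h1 ((pvOcc1_iff s).mp hc))]
    decide
  rw [if_neg h2]
  by_cases h3 : (["mid cap"].any (fun w => PySem.Chars.isIn w.toList s)) = true
  · rw [if_pos h3, pvBest_eq s 3 (by omega) ((pvOcc3_iff s).mpr h3)
      (by intro k hk; interval_cases k
          · exact fun hc => h0 ((pvOcc0_iff s).mp hc)
          · exact fun hc => h1 ((pvOcc1_iff s).mp hc)
          · exact fun hc => h2 ((pvOcc2_iff s).mp hc))]
    decide
  rw [if_neg h3]
  by_cases h4 : (["small cap"].any (fun w => PySem.Chars.isIn w.toList s)) = true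
  · rw [if_pos h4, pvBest_eq s 4 (by omega) ((pvOcc4_iff s).mpr h4)
      (by intro k hk; interval_cases k
          · exact fun hc => h0 ((pvOcc0_iff s).mp hc)
          · exact fun hc => h1 ((pvOcc1_iff s).mp hc)
          · exact fun hc => h2 ((pvOcc2_iff s).mp hc)
          · exact fun hc => h3 ((pvOcc3_iff s).mp hc))]
    decide
  rw [if_neg h4]
  by_cases h5 : (["multi cap", "flexi cap"].any (fun w => PySem.Chars.isIn w.toList s)) = true
  · rw [if_pos h5, pvBest_eq s 5 (by omega) ((pvOcc5_iff s).mpr h5)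
      (by intro k hk; interval_cases k
          · exact fun hc => h0 ((pvOcc0_iff s).mp hc)
          · exact fun hc => h1 ((pvOcc1_iff s).mp hc)
          · exact fun hc => h2 ((pvOcc2_iff s).mp hc)
          · exact fun hc => h3 ((pvOcc3_iff s).mp hc)
          · exact fun hc => h4 ((pvOcc4_iff s).mp hc))]
    decide
  rw [if_neg h5]
  by_cases h6 : (["hybrid", "balanced"].any (fun w => PySem.Chars.isIn w.toList s)) = true
  · rw [if_pos h6, pvBest_eq s 6 (by omega) ((pvOcc6_iff s).mpr h6)
      (by intro k hk; interval_cases k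
          · exact fun hc => h0 ((pvOcc0_iff s).mp hc)
          · exact fun hc => h1 ((pvOcc1_iff s).mp hc)
          · exact fun hc => h2 ((pvOcc2_iff s).mp hc)
          · exact fun hc => h3 ((pvOcc3_iff s).mp hc)
          · exact fun hc => h4 ((pvOcc4_iff s).mp hc)
          · exact fun hc => h5 ((pvOcc5_iff s).mp hc))]
    decide
  rw [if_neg h6]
  by_cases h7 : (["index"].any (fun w => PySem.Chars.isIn w.toList s)) = true
  · rw [if_pos h7, pvBest_eq s 7 (by omega) ((pvOcc7_iff s).mpr h7)
      (by intro k hk; interval_cases k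
          · exact fun hc => h0 ((pvOcc0_iff s).mp hc)
          · exact fun hc => h1 ((pvOcc1_iff s).mp hc)
          · exact fun hc => h2 ((pvOcc2_iff s).mp hc)
          · exact fun hc => h3 ((pvOcc3_iff s).mp hc)
          · exact fun hc => h4 ((pvOcc4_iff s).mp hc)
          · exact fun hc => h5 ((pvOcc5_iff s).mp hc)
          · exact fun hc => h6 ((pvOcc6_iff s).mp hc))]
    decide
  rw [if_neg h7]
  rw [pvBest_eq_default s
      (by intro k hk; interval_cases k
          · exact fun hc => h0 ((pvOcc0_iff s).mp hc)
          · exact fun hc => h1 ((pvOcc1_iff s).mp hc)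
          · exact fun hc => h2 ((pvOcc2_iff s).mp hc)
          · exact fun hc => h3 ((pvOcc3_iff s).mp hc)
          · exact fun hc => h4 ((pvOcc4_iff s).mp hc)
          · exact fun hc => h5 ((pvOcc5_iff s).mp hc)
          · exact fun hc => h6 ((pvOcc6_iff s).mp hc)
          · exact fun hc => h7 ((pvOcc7_iff s).mp hc))]
  decide
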